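-- pv_equiv track=rewrite | github.com/Pstary/CAMCMG | parse_diff.py | get_change_tokens
-- ===== SOURCE A (Python) =====
-- def tokenize_line(line):
--     return line.strip().split()
--
-- def get_change_tokens(source_str):
--     lines = source_str.strip().split("<nl>")
--     added_tokens = []
--     deleted_tokens = []
--     modified_tokens = []
--     context_tokens = []
--     source_tokens = []
--
--     i = 0
--     in_context_block = False
--
--     while i < len(lines):
--         line = lines[i].strip()
--
--         if not line:
--             i += 1
--             continue
--
--         if line.startswith('-') or line.startswith('+'):
--             if in_context_block:
--                 source_tokens.append("<KEEP_END>")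
--                 in_context_block = False
--
--         if line.startswith('-'):
--             del_lines = []
--             while i < len(lines) and lines[i].strip().startswith('-'):
--                 del_lines.append(lines[i].strip())
--                 i += 1
--
--             add_lines = []
--             while i < len(lines) and lines[i].strip().startswith('+'):
--                 add_lines.append(lines[i].strip())
--                 i += 1
--
--             if add_lines:
--                 del_tokens = [tok for l in del_lines for tok in tokenize_line(l)]
--                 add_tokens = [tok for l in add_lines for tok in tokenize_line(l)]
--                 modified_tokens.append((del_tokens, add_tokens))
--
--                 source_tokens.extend(["<REPLACE_OLD>"] + del_tokens)
--                 source_tokens.extend(["<REPLACE_NEW>"] + add_tokens + ["<REPLACE_END>"])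
--             else:
--                 for line in del_lines:
--                     toks = tokenize_line(line)
--                     deleted_tokens.extend(toks)
--                     source_tokens.extend(["<DELETE>"] + toks + ["<DELETE_END>"])
--
--         elif line.startswith('+'):
--             toks = tokenize_line(line.strip())
--             added_tokens.extend(toks)
--             source_tokens.extend(["<INSERT>"] + toks + ["<INSERT_END>"])
--             i += 1
--
--         else:
--             toks = tokenize_line(line)
--             context_tokens.extend(toks)
--             if not in_context_block:
--                 source_tokens.append("<KEEP>")
--                 in_context_block = True
--             source_tokens.extend(toks)
--             i += 1
--
--     if in_context_block:
--         source_tokens.append("<KEEP_END>")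
--
--     return source_tokens
-- ===== SOURCE B (Python) =====
-- def tokenize_line(line):
--     return line.strip().split()
--
-- def get_change_tokens(source_str):
--     # pass 1: classify stripped lines into typed segments
--     # ('del', [stripped lines]) | ('add', [stripped lines]) | ('ctx', [tokens]) | ('brk', None)
--     segs = []
--     cur = None
--     for raw in source_str.strip().split("<nl>"):
--         line = raw.strip()
--         if not line:
--             # blanks break del/add runs but a context run stays open
--             if cur is not None and cur[0] != 'ctx' and cur[0] != 'brk':
--                 segs.append(cur)
--                 cur = ('brk', None)
--             continue
--         kind = 'del' if line.startswith('-') else ('add' if line.startswith('+') else 'ctx')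
--         data = tokenize_line(line) if kind == 'ctx' else [line]
--         if cur is not None and cur[0] == kind:
--             cur = (kind, cur[1] + data)
--         else:
--             if cur is not None:
--                 segs.append(cur)
--             cur = (kind, data)
--     if cur is not None:
--         segs.append(cur)
--
--     # pass 2: render segments
--     out = []
--     i = 0
--     while i < len(segs):
--         kind, data = segs[i]
--         if kind == 'del':
--             if i + 1 < len(segs) and segs[i + 1][0] == 'add':
--                 out.append("<REPLACE_OLD>")
--                 for l in data:
--                     out.extend(tokenize_line(l))
--                 out.append("<REPLACE_NEW>")
--                 for l in segs[i + 1][1]: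
--                     out.extend(tokenize_line(l))
--                 out.append("<REPLACE_END>")
--                 i += 2
--                 continue
--             for l in data:
--                 out.append("<DELETE>")
--                 out.extend(tokenize_line(l))
--                 out.append("<DELETE_END>")
--         elif kind == 'add':
--             for l in data:
--                 out.append("<INSERT>")
--                 out.extend(tokenize_line(l))
--                 out.append("<INSERT_END>")
--         elif kind == 'ctx':
--             out.append("<KEEP>")
--             out.extend(data)
--             out.append("<KEEP_END>")
--         i += 1
--     return out
-- ===== Notes on version B (the rewrite author's own statement) =====
-- stated objective: alternative
-- what changed: A interleaves classification and output in one run-consuming while-loop with nested inner run loops and an in_context_block flag; B makes two passes: it first groups stripped lines into typed segments (delete/add/context/break, blanks breaking delete/add runs but not context runs), then renders the segment list, pairing a delete segment directly followed by an add segment into a REPLACE block, and drops A's four unused accumulators.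
import Mathlib
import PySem

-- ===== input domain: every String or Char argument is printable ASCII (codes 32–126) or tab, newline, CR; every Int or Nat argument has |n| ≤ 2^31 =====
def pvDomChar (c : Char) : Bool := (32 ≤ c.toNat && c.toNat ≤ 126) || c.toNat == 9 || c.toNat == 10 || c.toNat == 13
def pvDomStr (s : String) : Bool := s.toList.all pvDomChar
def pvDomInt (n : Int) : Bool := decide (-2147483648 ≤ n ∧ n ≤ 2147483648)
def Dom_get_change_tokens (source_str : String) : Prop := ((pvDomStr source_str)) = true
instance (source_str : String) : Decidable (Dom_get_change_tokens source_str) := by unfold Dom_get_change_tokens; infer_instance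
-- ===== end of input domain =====

-- B replaces A's single run-consuming while-loop by two passes (classify lines into typed
-- segments, then render the segments); same return value, objective: alternative decomposition.

-- ===== PORT A =====
def tokenize_line (line : String) : List String :=
  PySem.Str.split₀ (PySem.Str.strip line)

-- inner 'while i < len(lines) and lines[i].strip().startswith(pref)' collection loops of A
def takeRunA (pref : String) : List String → List String × List String
  | [] => ([], [])
  | l :: rest =>
    if PySem.Str.startswith (PySem.Str.strip l) pref then
      ((PySem.Str.strip l) :: (takeRunA pref rest).1, (takeRunA pref rest).2)
    else ([], l :: rest)

-- unfolding facts about takeRunA, cited by goA's termination proof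
theorem takeRunA_cons_pos (pref l : String) (rest : List String)
    (h : PySem.Str.startswith (PySem.Str.strip l) pref = true) :
    takeRunA pref (l :: rest) =
      (PySem.Str.strip l :: (takeRunA pref rest).1, (takeRunA pref rest).2) := by
  simp only [takeRunA, h, if_true]

theorem takeRunA_cons_neg (pref l : String) (rest : List String)
    (h : PySem.Str.startswith (PySem.Str.strip l) pref = false) :
    takeRunA pref (l :: rest) = ([], l :: rest) := by
  simp only [takeRunA, h, Bool.false_eq_true, if_false]

theorem takeRunA_snd_le (pref : String) (xs : List String) :
    (takeRunA pref xs).2.length ≤ xs.length := by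
  induction xs with
  | nil => simp [takeRunA]
  | cons l rest ih =>
    by_cases h : PySem.Str.startswith (PySem.Str.strip l) pref = true
    · rw [takeRunA_cons_pos pref l rest h]; exact Nat.le_succ_of_le ih
    · rw [takeRunA_cons_neg pref l rest (by simpa using h)]

def goA : List String → Bool → List String → List String
  | [], inCtx, acc => if inCtx then acc ++ ["<KEEP_END>"] else acc
  | l :: rest, inCtx, acc =>
    let line := PySem.Str.strip l
    if line = "" then goA rest inCtx acc
    else
      let acc1 := if (PySem.Str.startswith line "-" || PySem.Str.startswith line "+") && inCtx
        then acc ++ ["<KEEP_END>"] else acc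
      if hm : PySem.Str.startswith line "-" then
        let dl := (takeRunA "-" (l :: rest)).1
        let rest1 := (takeRunA "-" (l :: rest)).2
        let al := (takeRunA "+" rest1).1
        let rest2 := (takeRunA "+" rest1).2
        if al ≠ [] then
          goA rest2 false (acc1 ++ ["<REPLACE_OLD>"] ++ dl.flatMap tokenize_line
            ++ ["<REPLACE_NEW>"] ++ al.flatMap tokenize_line ++ ["<REPLACE_END>"])
        else
          goA rest1 false
            (acc1 ++ dl.flatMap (fun d => ["<DELETE>"] ++ tokenize_line d ++ ["<DELETE_END>"]))
      else if PySem.Str.startswith line "+" then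
        goA rest false
          (acc1 ++ ["<INSERT>"] ++ tokenize_line (PySem.Str.strip line) ++ ["<INSERT_END>"])
      else
        goA rest true ((if inCtx then acc1 else acc1 ++ ["<KEEP>"]) ++ tokenize_line line)
termination_by lines _ _ => lines.length
decreasing_by
  · simp
  · have h1 : (takeRunA "-" (l :: rest)).2.length ≤ rest.length := by
      rw [takeRunA_cons_pos "-" l rest hm]; exact takeRunA_snd_le "-" rest
    have h2 := takeRunA_snd_le "+" (takeRunA "-" (l :: rest)).2
    simp only [List.length_cons]; omega
  · have h1 : (takeRunA "-" (l :: rest)).2.length ≤ rest.length := by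
      rw [takeRunA_cons_pos "-" l rest hm]; exact takeRunA_snd_le "-" rest
    simp only [List.length_cons]; omega
  · simp
  · simp

def get_change_tokens (source_str : String) : List String :=
  goA ((PySem.Str.split? (PySem.Str.strip source_str) "<nl>").getD []) false []

-- ===== PORT B =====
inductive Seg : Type
  | del : List String → Seg
  | add : List String → Seg
  | ctx : List String → Seg
  | brk : Seg
deriving DecidableEq, Repr

-- pass 1 of Source B: classify stripped lines into typed segments ('cur' is the open segment)
def segGoB : List String → Option Seg → List Seg
  | [], cur => match cur with | none => [] | some h => [h]
  | raw :: rest, cur =>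
    let line := PySem.Str.strip raw
    if line = "" then
      match cur with
      | some (Seg.del ls) => Seg.del ls :: segGoB rest (some Seg.brk)
      | some (Seg.add ls) => Seg.add ls :: segGoB rest (some Seg.brk)
      | c => segGoB rest c
    else if PySem.Str.startswith line "-" then
      match cur with
      | some (Seg.del ls) => segGoB rest (some (Seg.del (ls ++ [line])))
      | none => segGoB rest (some (Seg.del [line]))
      | some h => h :: segGoB rest (some (Seg.del [line]))
    else if PySem.Str.startswith line "+" then
      match cur with
      | some (Seg.add ls) => segGoB rest (some (Seg.add (ls ++ [line])))
      | none => segGoB rest (some (Seg.add [line]))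
      | some h => h :: segGoB rest (some (Seg.add [line]))
    else
      match cur with
      | some (Seg.ctx ts) => segGoB rest (some (Seg.ctx (ts ++ tokenize_line line)))
      | none => segGoB rest (some (Seg.ctx (tokenize_line line)))
      | some h => h :: segGoB rest (some (Seg.ctx (tokenize_line line)))

-- pass 2 of Source B: render the segment list (a delete run directly followed by an add run pairs up)
def renderB : List Seg → List String
  | [] => []
  | Seg.del ds :: Seg.add as :: rest =>
      ["<REPLACE_OLD>"] ++ ds.flatMap tokenize_line ++ ["<REPLACE_NEW>"]
        ++ as.flatMap tokenize_line ++ ["<REPLACE_END>"] ++ renderB rest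
  | Seg.del ds :: rest =>
      ds.flatMap (fun d => ["<DELETE>"] ++ tokenize_line d ++ ["<DELETE_END>"]) ++ renderB rest
  | Seg.add as :: rest =>
      as.flatMap (fun a => ["<INSERT>"] ++ tokenize_line a ++ ["<INSERT_END>"]) ++ renderB rest
  | Seg.ctx ts :: rest => ["<KEEP>"] ++ ts ++ ["<KEEP_END>"] ++ renderB rest
  | Seg.brk :: rest => renderB rest

def get_change_tokens_alt (source_str : String) : List String :=
  renderB (segGoB ((PySem.Str.split? (PySem.Str.strip source_str) "<nl>").getD []) none)

-- ===== PRECONDITION & SPEC =====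
def Spec_get_change_tokens (source_str : String) (out : List String) : Prop := out = get_change_tokens_alt source_str
instance (source_str : String) (out : List String) : Decidable (Spec_get_change_tokens source_str out) := by unfold Spec_get_change_tokens; infer_instance

-- ===== CLAIM (what is proved, stated in full; the proofs are below) =====
def Claim_equal_get_change_tokens : Prop := ∀ (source_str : String), Dom_get_change_tokens source_str → Spec_get_change_tokens source_str (get_change_tokens source_str)

-- ===== LEMMAS AND PROOFS =====

theorem goA_nil (b : Bool) (acc : List String) :
    goA [] b acc = if b then acc ++ ["<KEEP_END>"] else acc := by
  rw [goA]

theorem goA_blank (l : String) (rest : List String) (b : Bool) (acc : List String)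
    (h : PySem.Str.strip l = "") : goA (l :: rest) b acc = goA rest b acc := by
  rw [goA]; simp only [h, eq_self_iff_true, if_true]

theorem goA_minus_rep (l : String) (rest : List String) (b : Bool) (acc : List String)
    (h0 : ¬ PySem.Str.strip l = "") (hm : PySem.Str.startswith (PySem.Str.strip l) "-" = true)
    (hal : ¬ (takeRunA "+" (takeRunA "-" (l :: rest)).2).1 = []) :
    goA (l :: rest) b acc =
      goA (takeRunA "+" (takeRunA "-" (l :: rest)).2).2 false
        ((if b then acc ++ ["<KEEP_END>"] else acc)
          ++ ["<REPLACE_OLD>"] ++ (takeRunA "-" (l :: rest)).1.flatMap tokenize_line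
          ++ ["<REPLACE_NEW>"] ++ (takeRunA "+" (takeRunA "-" (l :: rest)).2).1.flatMap tokenize_line
          ++ ["<REPLACE_END>"]) := by
  rw [goA]
  simp only [h0, hm, if_false, Bool.true_or, Bool.true_and, if_true, dif_pos]
  cases b <;> simp [hal]

theorem goA_minus_del (l : String) (rest : List String) (b : Bool) (acc : List String)
    (h0 : ¬ PySem.Str.strip l = "") (hm : PySem.Str.startswith (PySem.Str.strip l) "-" = true)
    (hal : (takeRunA "+" (takeRunA "-" (l :: rest)).2).1 = []) :
    goA (l :: rest) b acc =
      goA (takeRunA "-" (l :: rest)).2 false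
        ((if b then acc ++ ["<KEEP_END>"] else acc)
          ++ (takeRunA "-" (l :: rest)).1.flatMap
              (fun d => ["<DELETE>"] ++ tokenize_line d ++ ["<DELETE_END>"])) := by
  rw [goA]
  simp only [h0, hm, if_false, Bool.true_or, Bool.true_and, if_true, dif_pos]
  cases b <;> simp [hal]

theorem goA_plus (l : String) (rest : List String) (b : Bool) (acc : List String)
    (h0 : ¬ PySem.Str.strip l = "") (hm : PySem.Str.startswith (PySem.Str.strip l) "-" = false)
    (hp : PySem.Str.startswith (PySem.Str.strip l) "+" = true) :
    goA (l :: rest) b acc =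
      goA rest false ((if b then acc ++ ["<KEEP_END>"] else acc)
        ++ ["<INSERT>"] ++ tokenize_line (PySem.Str.strip (PySem.Str.strip l))
        ++ ["<INSERT_END>"]) := by
  rw [goA]
  simp only [h0, hm, hp, if_false, Bool.false_or, Bool.true_and, dif_neg, if_true]
  cases b <;> simp

theorem goA_ctx (l : String) (rest : List String) (b : Bool) (acc : List String)
    (h0 : ¬ PySem.Str.strip l = "") (hm : PySem.Str.startswith (PySem.Str.strip l) "-" = false)
    (hp : PySem.Str.startswith (PySem.Str.strip l) "+" = false) :
    goA (l :: rest) b acc =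
      goA rest true ((if b then acc else acc ++ ["<KEEP>"]) ++ tokenize_line (PySem.Str.strip l)) := by
  rw [goA]
  simp only [h0, hm, hp, Bool.false_or, Bool.false_and, if_false, dif_neg]
  cases b <;> simp

theorem goA_acc : ∀ (n : Nat) (lines : List String), lines.length ≤ n → ∀ (b : Bool) (acc : List String),
    goA lines b acc = acc ++ goA lines b [] := by
  intro n
  induction n with
  | zero =>
    intro lines hn b acc
    have : lines = [] := List.eq_nil_of_length_eq_zero (Nat.le_zero.mp hn)
    subst this
    cases b <;> simp [goA_nil]
  | succ n ih =>
    intro lines hn b acc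
    match lines with
    | [] => cases b <;> simp [goA_nil]
    | l :: rest =>
      simp only [List.length_cons, Nat.succ_le_succ_iff] at hn
      by_cases h0 : PySem.Str.strip l = ""
      · rw [goA_blank l rest b acc h0, goA_blank l rest b [] h0]
        exact ih rest hn b acc
      · by_cases hm : PySem.Str.startswith (PySem.Str.strip l) "-" = true
        · by_cases hal : (takeRunA "+" (takeRunA "-" (l :: rest)).2).1 = []
          · rw [goA_minus_del l rest b acc h0 hm hal, goA_minus_del l rest b [] h0 hm hal]
            have hr1 : (takeRunA "-" (l :: rest)).2.length ≤ n := by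
              have := takeRunA_snd_le "-" rest
              rw [takeRunA_cons_pos "-" l rest hm]
              dsimp only
              omega
            rw [ih _ hr1 false]
            conv_rhs => rw [ih _ hr1 false]
            cases b <;> simp
          · rw [goA_minus_rep l rest b acc h0 hm hal, goA_minus_rep l rest b [] h0 hm hal]
            have hr1 : (takeRunA "+" (takeRunA "-" (l :: rest)).2).2.length ≤ n := by
              have h1 := takeRunA_snd_le "+" (takeRunA "-" (l :: rest)).2
              have h2 := takeRunA_snd_le "-" rest
              rw [takeRunA_cons_pos "-" l rest hm] at h1 ⊢
              dsimp only at h1 ⊢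
              omega
            rw [ih _ hr1 false]
            conv_rhs => rw [ih _ hr1 false]
            cases b <;> simp
        · rw [Bool.not_eq_true] at hm
          by_cases hp : PySem.Str.startswith (PySem.Str.strip l) "+" = true
          · rw [goA_plus l rest b acc h0 hm hp, goA_plus l rest b [] h0 hm hp]
            rw [ih rest hn false]
            conv_rhs => rw [ih rest hn false]
            cases b <;> simp
          · rw [Bool.not_eq_true] at hp
            rw [goA_ctx l rest b acc h0 hm hp, goA_ctx l rest b [] h0 hm hp]
            rw [ih rest hn true]
            conv_rhs => rw [ih rest hn true]
            cases b <;> simp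

theorem sw_plus_not_minus (s : String) (h : PySem.Str.startswith s "+" = true) :
    PySem.Str.startswith s "-" = false := by
  by_contra hc
  rw [Bool.not_eq_false] at hc
  simp only [PySem.Str.startswith_eq] at h hc
  rw [PySem.Chars.startswith_iff] at h hc
  rcases h with ⟨r1, h1⟩
  rcases hc with ⟨r2, h2⟩
  rw [← h1] at h2
  simp at h2


theorem dropWhile_head (p : Char → Bool) (l : List Char) (h : l.dropWhile p ≠ []) :
    p ((l.dropWhile p).headI) = false := by
  induction l with
  | nil => simp at h
  | cons a t ih =>
    by_cases hp : p a
    · rw [List.dropWhile_cons_of_pos hp] at h ⊢; exact ih h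
    · rw [List.dropWhile_cons_of_neg hp] at h ⊢
      simpa using hp

theorem dropWhile_self (p : Char → Bool) (u : List Char) (h : p u.headI = false ∨ u = []) :
    u.dropWhile p = u := by
  cases u with
  | nil => simp
  | cons a t =>
    rcases h with h | h
    · simp only [List.headI] at h
      rw [List.dropWhile_cons_of_neg (by simp [h])]
    · simp at h

theorem dropWhile_idem (p : Char → Bool) (l : List Char) :
    (l.dropWhile p).dropWhile p = l.dropWhile p := by
  by_cases h : l.dropWhile p = []
  · rw [h]; simp
  · exact dropWhile_self p _ (Or.inl (dropWhile_head p l h))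

theorem chars_strip_idem (cs : List Char) :
    PySem.Chars.strip (PySem.Chars.strip cs) = PySem.Chars.strip cs := by
  unfold PySem.Chars.strip PySem.Chars.rstrip PySem.Chars.lstrip
  set p := PySem.Chars.isspace with hp
  set t := cs.dropWhile p with ht
  set u := (t.reverse.dropWhile p).reverse with hu
  have hpref : u <+: t := by
    have : t.reverse.dropWhile p <:+ t.reverse := List.dropWhile_suffix p
    have := List.reverse_prefix.mpr (by simpa using this)
    simpa [hu] using this
  have hself : u.dropWhile p = u := by
    apply dropWhile_self
    by_cases hne : u = []
    · right; exact hne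
    · left
      obtain ⟨r, hr⟩ := hpref
      have htne : t ≠ [] := by intro h0; rw [h0] at hr; simp at hr; exact hne hr.1
      have : u.headI = t.headI := by
        cases hc : u with
        | nil => exact absurd hc hne
        | cons a w => rw [← hr, hc]; simp
      rw [this]
      exact dropWhile_head p cs (by rwa [← ht])
  rw [hself, hu, List.reverse_reverse, dropWhile_idem, ← hu]

theorem strip_idem (s : String) :
    PySem.Str.strip (PySem.Str.strip s) = PySem.Str.strip s := by
  have h := chars_strip_idem s.toList
  have h2 : (PySem.Str.strip (PySem.Str.strip s)).toList = (PySem.Str.strip s).toList := by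
    simp [PySem.Str.toList_strip, h]
  exact String.toList_injective h2

theorem segGoB_brk (lines : List String) :
    segGoB lines (some Seg.brk) = Seg.brk :: segGoB lines none := by
  induction lines with
  | nil => rfl
  | cons raw rest ih =>
    rw [segGoB, segGoB]
    by_cases h0 : PySem.Str.strip raw = ""
    · rw [if_pos h0, if_pos h0]
      exact ih
    · rw [if_neg h0, if_neg h0]
      split_ifs <;> rfl
    all_goals simp

theorem segGoB_runDel (lines : List String) (ds : List String) :
    segGoB lines (some (Seg.del ds)) =
      segGoB (takeRunA "-" lines).2 (some (Seg.del (ds ++ (takeRunA "-" lines).1))) := by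
  induction lines generalizing ds with
  | nil => simp [takeRunA]
  | cons raw rest ih =>
    by_cases hm : PySem.Str.startswith (PySem.Str.strip raw) "-" = true
    · have h0 : ¬ PySem.Str.strip raw = "" := by
        intro h; rw [h] at hm; exact absurd hm (by decide)
      rw [takeRunA_cons_pos "-" raw rest hm]
      rw [segGoB]
      simp only [h0, hm, if_false, if_true]
      rw [ih (ds ++ [PySem.Str.strip raw])]
      simp
    · rw [takeRunA_cons_neg "-" raw rest (by simpa using hm)]
      simp

theorem segGoB_runAdd (lines : List String) (as : List String) :
    segGoB lines (some (Seg.add as)) =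
      segGoB (takeRunA "+" lines).2 (some (Seg.add (as ++ (takeRunA "+" lines).1))) := by
  induction lines generalizing as with
  | nil => simp [takeRunA]
  | cons raw rest ih =>
    by_cases hp : PySem.Str.startswith (PySem.Str.strip raw) "+" = true
    · have h0 : ¬ PySem.Str.strip raw = "" := by
        intro h; rw [h] at hp; exact absurd hp (by decide)
      have hm : PySem.Str.startswith (PySem.Str.strip raw) "-" = false :=
        sw_plus_not_minus _ hp
      rw [takeRunA_cons_pos "+" raw rest hp]
      rw [segGoB]
      simp only [h0, hm, hp, if_false, if_true, Bool.false_eq_true]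
      rw [ih (as ++ [PySem.Str.strip raw])]
      simp
    · rw [takeRunA_cons_neg "+" raw rest (by simpa using hp)]
      simp

theorem segGoB_ctx_head (lines : List String) (ts : List String) :
    ∃ ts' Z, segGoB lines (some (Seg.ctx ts)) = Seg.ctx ts' :: Z := by
  induction lines generalizing ts with
  | nil => exact ⟨ts, [], rfl⟩
  | cons raw rest ih =>
    rw [segGoB]
    by_cases h0 : PySem.Str.strip raw = ""
    · rw [if_pos h0]
      exact ih ts
    · rw [if_neg h0]
      split_ifs with hm hp
      · exact ⟨ts, _, rfl⟩
      · exact ⟨ts, _, rfl⟩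
      · exact ih _
    all_goals simp

def DELS (ds : List String) : List String :=
  ds.flatMap (fun d => ["<DELETE>"] ++ tokenize_line d ++ ["<DELETE_END>"])
def INS (as : List String) : List String :=
  as.flatMap (fun a => ["<INSERT>"] ++ tokenize_line a ++ ["<INSERT_END>"])

theorem renderB_nil : renderB [] = [] := rfl
theorem renderB_brk_cons (Z : List Seg) : renderB (Seg.brk :: Z) = renderB Z := by
  rw [renderB]
theorem renderB_ctx_cons (ts : List String) (Z : List Seg) :
    renderB (Seg.ctx ts :: Z) = ["<KEEP>"] ++ ts ++ ["<KEEP_END>"] ++ renderB Z := by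
  rw [renderB]
theorem renderB_add_cons (as : List String) (Z : List Seg) :
    renderB (Seg.add as :: Z) = INS as ++ renderB Z := by
  rw [renderB, INS]
theorem renderB_del_add (ds as : List String) (Z : List Seg) :
    renderB (Seg.del ds :: Seg.add as :: Z) =
      ["<REPLACE_OLD>"] ++ ds.flatMap tokenize_line ++ ["<REPLACE_NEW>"]
        ++ as.flatMap tokenize_line ++ ["<REPLACE_END>"] ++ renderB Z := by
  rw [renderB]
theorem renderB_del_nil (ds : List String) : renderB [Seg.del ds] = DELS ds := by
  rw [renderB, DELS, renderB_nil, List.append_nil]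
  all_goals simp
theorem renderB_del_brk (ds : List String) (Z : List Seg) :
    renderB (Seg.del ds :: Seg.brk :: Z) = DELS ds ++ renderB Z := by
  rw [renderB, renderB_brk_cons, DELS]
  all_goals simp
theorem renderB_del_ctx (ds ts : List String) (Z : List Seg) :
    renderB (Seg.del ds :: Seg.ctx ts :: Z) = DELS ds ++ renderB (Seg.ctx ts :: Z) := by
  rw [renderB, DELS]
  all_goals simp

theorem segB_nil_none : segGoB [] none = [] := rfl
theorem segB_nil_some (h : Seg) : segGoB [] (some h) = [h] := rfl

theorem segB_blank_none (raw : String) (rest : List String) (h0 : PySem.Str.strip raw = "") :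
    segGoB (raw :: rest) none = segGoB rest none := by
  rw [segGoB, if_pos h0]
theorem segB_blank_brk (raw : String) (rest : List String) (h0 : PySem.Str.strip raw = "") :
    segGoB (raw :: rest) (some Seg.brk) = segGoB rest (some Seg.brk) := by
  rw [segGoB, if_pos h0]
  all_goals simp
theorem segB_blank_ctx (raw : String) (rest : List String) (ts : List String)
    (h0 : PySem.Str.strip raw = "") :
    segGoB (raw :: rest) (some (Seg.ctx ts)) = segGoB rest (some (Seg.ctx ts)) := by
  rw [segGoB, if_pos h0]
  all_goals simp
theorem segB_blank_add (raw : String) (rest : List String) (ls : List String)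
    (h0 : PySem.Str.strip raw = "") :
    segGoB (raw :: rest) (some (Seg.add ls)) = Seg.add ls :: segGoB rest (some Seg.brk) := by
  rw [segGoB, if_pos h0]
theorem segB_blank_del (raw : String) (rest : List String) (ls : List String)
    (h0 : PySem.Str.strip raw = "") :
    segGoB (raw :: rest) (some (Seg.del ls)) = Seg.del ls :: segGoB rest (some Seg.brk) := by
  rw [segGoB, if_pos h0]

theorem segB_minus_none (raw : String) (rest : List String)
    (h0 : ¬ PySem.Str.strip raw = "") (hm : PySem.Str.startswith (PySem.Str.strip raw) "-" = true) :
    segGoB (raw :: rest) none = segGoB rest (some (Seg.del [PySem.Str.strip raw])) := by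
  rw [segGoB, if_neg h0, if_pos hm]

theorem segB_minus_some (raw : String) (rest : List String) (h : Seg)
    (h0 : ¬ PySem.Str.strip raw = "") (hm : PySem.Str.startswith (PySem.Str.strip raw) "-" = true)
    (hne : ∀ ls, h ≠ Seg.del ls) :
    segGoB (raw :: rest) (some h) = h :: segGoB rest (some (Seg.del [PySem.Str.strip raw])) := by
  cases h with
  | del ls => exact absurd rfl (hne ls)
  | add ls =>
    rw [segGoB, if_neg h0, if_pos hm]
    all_goals simp
  | ctx ts =>
    rw [segGoB, if_neg h0, if_pos hm]
    all_goals simp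
  | brk =>
    rw [segGoB, if_neg h0, if_pos hm]
    all_goals simp

theorem segB_plus_none (raw : String) (rest : List String)
    (h0 : ¬ PySem.Str.strip raw = "") (hm : PySem.Str.startswith (PySem.Str.strip raw) "-" = false)
    (hp : PySem.Str.startswith (PySem.Str.strip raw) "+" = true) :
    segGoB (raw :: rest) none = segGoB rest (some (Seg.add [PySem.Str.strip raw])) := by
  rw [segGoB, if_neg h0, if_neg (by simpa using hm), if_pos hp]

theorem segB_plus_some (raw : String) (rest : List String) (h : Seg)
    (h0 : ¬ PySem.Str.strip raw = "") (hm : PySem.Str.startswith (PySem.Str.strip raw) "-" = false)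
    (hp : PySem.Str.startswith (PySem.Str.strip raw) "+" = true)
    (hne : ∀ ls, h ≠ Seg.add ls) :
    segGoB (raw :: rest) (some h) = h :: segGoB rest (some (Seg.add [PySem.Str.strip raw])) := by
  cases h with
  | add ls => exact absurd rfl (hne ls)
  | del ls =>
    rw [segGoB, if_neg h0, if_neg (by simpa using hm), if_pos hp]
    all_goals simp
  | ctx ts =>
    rw [segGoB, if_neg h0, if_neg (by simpa using hm), if_pos hp]
    all_goals simp
  | brk =>
    rw [segGoB, if_neg h0, if_neg (by simpa using hm), if_pos hp]
    all_goals simp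

theorem segB_ctxline_none (raw : String) (rest : List String)
    (h0 : ¬ PySem.Str.strip raw = "") (hm : PySem.Str.startswith (PySem.Str.strip raw) "-" = false)
    (hp : PySem.Str.startswith (PySem.Str.strip raw) "+" = false) :
    segGoB (raw :: rest) none =
      segGoB rest (some (Seg.ctx (tokenize_line (PySem.Str.strip raw)))) := by
  rw [segGoB, if_neg h0, if_neg (by simpa using hm), if_neg (by simpa using hp)]

theorem segB_ctxline_ctx (raw : String) (rest : List String) (ts : List String)
    (h0 : ¬ PySem.Str.strip raw = "") (hm : PySem.Str.startswith (PySem.Str.strip raw) "-" = false)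
    (hp : PySem.Str.startswith (PySem.Str.strip raw) "+" = false) :
    segGoB (raw :: rest) (some (Seg.ctx ts)) =
      segGoB rest (some (Seg.ctx (ts ++ tokenize_line (PySem.Str.strip raw)))) := by
  rw [segGoB, if_neg h0, if_neg (by simpa using hm), if_neg (by simpa using hp)]
  all_goals simp

theorem segB_ctxline_some (raw : String) (rest : List String) (h : Seg)
    (h0 : ¬ PySem.Str.strip raw = "") (hm : PySem.Str.startswith (PySem.Str.strip raw) "-" = false)
    (hp : PySem.Str.startswith (PySem.Str.strip raw) "+" = false)
    (hne : ∀ ts, h ≠ Seg.ctx ts) :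
    segGoB (raw :: rest) (some h) =
      h :: segGoB rest (some (Seg.ctx (tokenize_line (PySem.Str.strip raw)))) := by
  cases h with
  | ctx ts => exact absurd rfl (hne ts)
  | del ls =>
    rw [segGoB, if_neg h0, if_neg (by simpa using hm), if_neg (by simpa using hp)]
    all_goals simp
  | add ls =>
    rw [segGoB, if_neg h0, if_neg (by simpa using hm), if_neg (by simpa using hp)]
    all_goals simp
  | brk =>
    rw [segGoB, if_neg h0, if_neg (by simpa using hm), if_neg (by simpa using hp)]
    all_goals simp

theorem takeRunA_snd_head (pref : String) (xs : List String) :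
    (takeRunA pref xs).2 = [] ∨
      PySem.Str.startswith (PySem.Str.strip (takeRunA pref xs).2.headI) pref = false := by
  induction xs with
  | nil => left; rfl
  | cons l rest ih =>
    by_cases h : PySem.Str.startswith (PySem.Str.strip l) pref = true
    · rw [takeRunA_cons_pos pref l rest h]; exact ih
    · rw [takeRunA_cons_neg pref l rest (by simpa using h)]
      right
      simpa using h

theorem render_del_lone (lines : List String) (ds : List String)
    (h : lines = [] ∨ (PySem.Str.startswith (PySem.Str.strip lines.headI) "+" = false ∧
                       PySem.Str.startswith (PySem.Str.strip lines.headI) "-" = false)) :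
    renderB (segGoB lines (some (Seg.del ds))) = DELS ds ++ renderB (segGoB lines none) := by
  cases lines with
  | nil => rw [segB_nil_some, renderB_del_nil, segB_nil_none, renderB_nil, List.append_nil]
  | cons raw rest =>
    have hcond := h.resolve_left (by simp)
    simp only [List.headI] at hcond
    obtain ⟨hp, hm⟩ := hcond
    by_cases h0 : PySem.Str.strip raw = ""
    · rw [segB_blank_del raw rest ds h0, segGoB_brk, renderB_del_brk,
         segB_blank_none raw rest h0]
    · rw [segB_ctxline_some raw rest (Seg.del ds) h0 hm hp (by intro ts h; cases h)]
      obtain ⟨ts', Z, hz⟩ := segGoB_ctx_head rest (tokenize_line (PySem.Str.strip raw))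
      rw [hz, renderB_del_ctx, ← hz, segB_ctxline_none raw rest h0 hm hp]

theorem render_del_add (lines : List String) (ds as : List String)
    (h : lines = [] ∨ PySem.Str.startswith (PySem.Str.strip lines.headI) "+" = false) :
    renderB (Seg.del ds :: segGoB lines (some (Seg.add as))) =
      ["<REPLACE_OLD>"] ++ ds.flatMap tokenize_line ++ ["<REPLACE_NEW>"]
        ++ as.flatMap tokenize_line ++ ["<REPLACE_END>"] ++ renderB (segGoB lines none) := by
  cases lines with
  | nil => rw [segB_nil_some, renderB_del_add, segB_nil_none]
  | cons raw rest =>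
    have hp := h.resolve_left (by simp)
    simp only [List.headI] at hp
    by_cases h0 : PySem.Str.strip raw = ""
    · rw [segB_blank_add raw rest as h0, segGoB_brk, renderB_del_add,
         renderB_brk_cons, segB_blank_none raw rest h0]
    · by_cases hm : PySem.Str.startswith (PySem.Str.strip raw) "-" = true
      · rw [segB_minus_some raw rest (Seg.add as) h0 hm (by intro ls h; cases h),
           renderB_del_add, segB_minus_none raw rest h0 hm]
      · rw [Bool.not_eq_true] at hm
        rw [segB_ctxline_some raw rest (Seg.add as) h0 hm hp (by intro ts h; cases h),
           renderB_del_add, segB_ctxline_none raw rest h0 hm hp]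

def openP : Option Seg → List String
  | none => []
  | some Seg.brk => []
  | some (Seg.ctx ts) => "<KEEP>" :: ts
  | some (Seg.del ds) => DELS ds
  | some (Seg.add as) => INS as

def isCtxS : Option Seg → Bool
  | some (Seg.ctx _) => true
  | _ => false

theorem emit_render (cur : Option Seg) (hcur : ∀ ds, cur ≠ some (Seg.del ds)) (X : List Seg) :
    renderB (match cur with | none => X | some h => h :: X) =
      (openP cur ++ (if isCtxS cur then ["<KEEP_END>"] else [])) ++ renderB X := by
  match cur with
  | none => simp [openP, isCtxS]
  | some Seg.brk => simp [openP, isCtxS, renderB_brk_cons]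
  | some (Seg.ctx ts) => simp [openP, isCtxS, renderB_ctx_cons]
  | some (Seg.add as) => simp [openP, isCtxS, renderB_add_cons]
  | some (Seg.del ds) => exact absurd rfl (hcur ds)

theorem segB_step_minus (l : String) (rest : List String) (cur : Option Seg)
    (h0 : ¬ PySem.Str.strip l = "") (hm : PySem.Str.startswith (PySem.Str.strip l) "-" = true)
    (hcur : ∀ ds, cur ≠ some (Seg.del ds)) :
    segGoB (l :: rest) cur =
      (match cur with
        | none => segGoB rest (some (Seg.del [PySem.Str.strip l]))
        | some h => h :: segGoB rest (some (Seg.del [PySem.Str.strip l]))) := by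
  match cur with
  | none => exact segB_minus_none l rest h0 hm
  | some h => exact segB_minus_some l rest h h0 hm (fun ls he => hcur ls (by rw [he]))

theorem segB_step_plus (l : String) (rest : List String) (cur : Option Seg)
    (h0 : ¬ PySem.Str.strip l = "") (hm : PySem.Str.startswith (PySem.Str.strip l) "-" = false)
    (hp : PySem.Str.startswith (PySem.Str.strip l) "+" = true)
    (hcur : ∀ ds, cur ≠ some (Seg.del ds)) (hcadd : ∀ as, cur ≠ some (Seg.add as)) :
    segGoB (l :: rest) cur =
      (match cur with
        | none => segGoB rest (some (Seg.add [PySem.Str.strip l]))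
        | some h => h :: segGoB rest (some (Seg.add [PySem.Str.strip l]))) := by
  match cur with
  | none => exact segB_plus_none l rest h0 hm hp
  | some h => exact segB_plus_some l rest h h0 hm hp (fun ls he => hcadd ls (by rw [he]))

theorem segB_step_ctx (l : String) (rest : List String) (cur : Option Seg)
    (h0 : ¬ PySem.Str.strip l = "") (hm : PySem.Str.startswith (PySem.Str.strip l) "-" = false)
    (hp : PySem.Str.startswith (PySem.Str.strip l) "+" = false)
    (hcctx : ∀ ts, cur ≠ some (Seg.ctx ts)) :
    segGoB (l :: rest) cur =
      (match cur with
        | none => segGoB rest (some (Seg.ctx (tokenize_line (PySem.Str.strip l))))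
        | some h => h :: segGoB rest (some (Seg.ctx (tokenize_line (PySem.Str.strip l))))) := by
  match cur with
  | none => exact segB_ctxline_none l rest h0 hm hp
  | some h => exact segB_ctxline_some l rest h h0 hm hp (fun ts he => hcctx ts (by rw [he]))

theorem sw_plus_nonblank (s : String) (h : PySem.Str.startswith s "+" = true) : ¬ s = "" := by
  intro he; rw [he] at h; exact absurd h (by decide)

theorem takeRunA_fst_ne (pref : String) (xs : List String)
    (h : (takeRunA pref xs).1 ≠ []) :
    xs ≠ [] ∧ PySem.Str.startswith (PySem.Str.strip xs.headI) pref = true := by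
  cases xs with
  | nil => simp [takeRunA] at h
  | cons l rest =>
    by_cases hl : PySem.Str.startswith (PySem.Str.strip l) pref = true
    · exact ⟨by simp, by simpa using hl⟩
    · rw [takeRunA_cons_neg pref l rest (by simpa using hl)] at h
      simp at h

theorem INS_append (a b : List String) : INS (a ++ b) = INS a ++ INS b := by
  simp [INS]

theorem INS_single (x : String) :
    INS [x] = ["<INSERT>"] ++ tokenize_line x ++ ["<INSERT_END>"] := by
  simp [INS]

theorem main_nil (cur : Option Seg) (hcur : ∀ ds, cur ≠ some (Seg.del ds)) :
    openP cur ++ goA [] (isCtxS cur) [] = renderB (segGoB [] cur) := by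
  match cur with
  | none => simp [openP, isCtxS, goA_nil, segB_nil_none, renderB_nil]
  | some Seg.brk =>
    rw [segB_nil_some, renderB_brk_cons, renderB_nil]
    simp [openP, isCtxS, goA_nil]
  | some (Seg.ctx ts) =>
    rw [segB_nil_some, renderB_ctx_cons, renderB_nil]
    simp [openP, isCtxS, goA_nil]
  | some (Seg.add as) =>
    rw [segB_nil_some, renderB_add_cons, renderB_nil]
    simp [openP, isCtxS, goA_nil]
  | some (Seg.del ds) => exact absurd rfl (hcur ds)

theorem segB_plus_add (l : String) (rest : List String) (as : List String)
    (h0 : ¬ PySem.Str.strip l = "") (hm : PySem.Str.startswith (PySem.Str.strip l) "-" = false)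
    (hp : PySem.Str.startswith (PySem.Str.strip l) "+" = true) :
    segGoB (l :: rest) (some (Seg.add as)) =
      segGoB rest (some (Seg.add (as ++ [PySem.Str.strip l]))) := by
  rw [segGoB, if_neg h0, if_neg (by simpa using hm), if_pos hp]

set_option maxHeartbeats 2000000 in
theorem main_inv : ∀ (n : Nat) (lines : List String) (cur : Option Seg),
    lines.length ≤ n → (∀ ds, cur ≠ some (Seg.del ds)) →
    openP cur ++ goA lines (isCtxS cur) [] = renderB (segGoB lines cur) := by
  intro n
  induction n with
  | zero =>
    intro lines cur hn hcur
    have : lines = [] := List.eq_nil_of_length_eq_zero (Nat.le_zero.mp hn)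
    subst this
    exact main_nil cur hcur
  | succ n ih =>
    intro lines cur hn hcur
    match lines with
    | [] => exact main_nil cur hcur
    | l :: rest =>
      simp only [List.length_cons, Nat.succ_le_succ_iff] at hn
      by_cases h0 : PySem.Str.strip l = ""
      · -- blank line
        rw [goA_blank l rest _ [] h0]
        match cur, hcur with
        | none, _ =>
          rw [segB_blank_none l rest h0]
          exact ih rest none hn (by simp)
        | some Seg.brk, _ =>
          rw [segB_blank_brk l rest h0]
          exact ih rest (some Seg.brk) hn (by simp)
        | some (Seg.ctx ts), _ =>
          rw [segB_blank_ctx l rest ts h0]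
          exact ih rest (some (Seg.ctx ts)) hn (by simp)
        | some (Seg.add as), _ =>
          rw [segB_blank_add l rest as h0, segGoB_brk, renderB_add_cons, renderB_brk_cons]
          have h2 : goA rest false [] = renderB (segGoB rest none) := by
            simpa [openP, isCtxS] using ih rest none hn (by simp)
          simp [openP, isCtxS, h2]
        | some (Seg.del ds), hcur => exact absurd rfl (hcur ds)
      · by_cases hm : PySem.Str.startswith (PySem.Str.strip l) "-" = true
        · -- '-' run
          have hD := takeRunA_cons_pos "-" l rest hm
          have hstep : segGoB rest (some (Seg.del [PySem.Str.strip l])) =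
              segGoB (takeRunA "-" (l :: rest)).2 (some (Seg.del (takeRunA "-" (l :: rest)).1)) := by
            rw [segGoB_runDel rest [PySem.Str.strip l], hD]
            simp
          have hsegfull : segGoB (l :: rest) cur =
              (match cur with
                | none => segGoB (takeRunA "-" (l :: rest)).2
                    (some (Seg.del (takeRunA "-" (l :: rest)).1))
                | some h => h :: segGoB (takeRunA "-" (l :: rest)).2
                    (some (Seg.del (takeRunA "-" (l :: rest)).1))) := by
            rw [segB_step_minus l rest cur h0 hm hcur, hstep]
          have hR1len : (takeRunA "-" (l :: rest)).2.length ≤ n := by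
            have := takeRunA_snd_le "-" rest
            rw [hD]; dsimp only; omega
          by_cases hal : (takeRunA "+" (takeRunA "-" (l :: rest)).2).1 = []
          · -- lone DELETE blocks
            rw [goA_minus_del l rest (isCtxS cur) [] h0 hm hal]
            rw [goA_acc _ _ hR1len false _]
            rw [hsegfull, emit_render cur hcur]
            rw [render_del_lone _ _ ?hcond]
            case hcond =>
              rcases takeRunA_snd_head "-" (l :: rest) with h | h
              · exact Or.inl h
              · cases hR1 : (takeRunA "-" (l :: rest)).2 with
                | nil => exact Or.inl rfl
                | cons r1 t1 =>
                  right
                  refine ⟨?_, by rw [hR1] at h; simpa using h⟩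
                  by_contra hplus
                  rw [Bool.not_eq_false] at hplus
                  rw [hR1, takeRunA_cons_pos "+" r1 t1 (by simpa using hplus)] at hal
                  simp at hal
            have h2 : goA (takeRunA "-" (l :: rest)).2 false [] =
                renderB (segGoB (takeRunA "-" (l :: rest)).2 none) := by
              simpa [openP, isCtxS] using ih _ none hR1len (by simp)
            rw [h2]
            simp [DELS]
          · -- REPLACE block
            rw [goA_minus_rep l rest (isCtxS cur) [] h0 hm hal]
            obtain ⟨hR1ne, hplus⟩ := takeRunA_fst_ne "+" _ hal
            have hR2len : (takeRunA "+" (takeRunA "-" (l :: rest)).2).2.length ≤ n := by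
              have := takeRunA_snd_le "+" (takeRunA "-" (l :: rest)).2
              omega
            rw [goA_acc _ _ hR2len false _]
            rw [hsegfull, emit_render cur hcur]
            -- unfold the '+' run on the B side
            cases hR1 : (takeRunA "-" (l :: rest)).2 with
            | nil => exact absurd hR1 hR1ne
            | cons r1 t1 =>
              rw [hR1] at hplus
              simp only [List.headI] at hplus
              have hr1m : PySem.Str.startswith (PySem.Str.strip r1) "-" = false :=
                sw_plus_not_minus _ hplus
              have hr10 : ¬ PySem.Str.strip r1 = "" := sw_plus_nonblank _ hplus
              have hAL := takeRunA_cons_pos "+" r1 t1 hplus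
              have hseg2 : segGoB (r1 :: t1) (some (Seg.del (takeRunA "-" (l :: rest)).1)) =
                  Seg.del (takeRunA "-" (l :: rest)).1 ::
                    segGoB (takeRunA "+" (r1 :: t1)).2
                      (some (Seg.add (takeRunA "+" (r1 :: t1)).1)) := by
                rw [segB_plus_some r1 t1 _ hr10 hr1m hplus (by intro ls he; cases he)]
                rw [segGoB_runAdd t1 [PySem.Str.strip r1], hAL]
                simp
              rw [hseg2]
              rw [render_del_add _ _ _ ?hcond2]
              case hcond2 =>
                rcases takeRunA_snd_head "+" (r1 :: t1) with h | h
                · exact Or.inl h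
                · exact Or.inr h
              have h2 : goA (takeRunA "+" (r1 :: t1)).2 false [] =
                  renderB (segGoB (takeRunA "+" (r1 :: t1)).2 none) := by
                have hlen : (takeRunA "+" (r1 :: t1)).2.length ≤ n := by
                  rw [← hR1]; exact hR2len
                simpa [openP, isCtxS] using ih _ none hlen (by simp)
              rw [h2]
              simp
        · rw [Bool.not_eq_true] at hm
          by_cases hp : PySem.Str.startswith (PySem.Str.strip l) "+" = true
          · -- single INSERT line
            rw [goA_plus l rest (isCtxS cur) [] h0 hm hp, strip_idem l]
            rw [goA_acc _ _ hn false _]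
            match cur, hcur with
            | some (Seg.add as), _ =>
              rw [segB_plus_add l rest as h0 hm hp]
              have h2 := ih rest (some (Seg.add (as ++ [PySem.Str.strip l]))) hn (by simp)
              simp only [openP, isCtxS, INS_append, INS_single] at h2 ⊢
              rw [← h2]
              simp
            | none, _ =>
              rw [segB_step_plus l rest none h0 hm hp (by simp) (by simp)]
              have h2 := ih rest (some (Seg.add [PySem.Str.strip l])) hn (by simp)
              simp only [openP, isCtxS, INS_single] at h2 ⊢
              rw [← h2]
              simp
            | some Seg.brk, _ =>
              rw [segB_step_plus l rest (some Seg.brk) h0 hm hp (by simp) (by simp),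
                 renderB_brk_cons]
              have h2 := ih rest (some (Seg.add [PySem.Str.strip l])) hn (by simp)
              simp only [openP, isCtxS, INS_single] at h2 ⊢
              rw [← h2]
              simp
            | some (Seg.ctx ts), _ =>
              rw [segB_step_plus l rest (some (Seg.ctx ts)) h0 hm hp (by simp) (by simp),
                 renderB_ctx_cons]
              have h2 := ih rest (some (Seg.add [PySem.Str.strip l])) hn (by simp)
              simp only [openP, isCtxS, INS_single] at h2 ⊢
              rw [← h2]
              simp
            | some (Seg.del ds), hcur => exact absurd rfl (hcur ds)
          · -- context line
            rw [Bool.not_eq_true] at hp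
            rw [goA_ctx l rest (isCtxS cur) [] h0 hm hp]
            rw [goA_acc _ _ hn true _]
            match cur, hcur with
            | some (Seg.ctx ts), _ =>
              rw [segB_ctxline_ctx l rest ts h0 hm hp]
              have h2 := ih rest (some (Seg.ctx (ts ++ tokenize_line (PySem.Str.strip l)))) hn
                (by simp)
              simp only [openP, isCtxS] at h2 ⊢
              rw [← h2]
              simp
            | none, _ =>
              rw [segB_step_ctx l rest none h0 hm hp (by simp)]
              have h2 := ih rest (some (Seg.ctx (tokenize_line (PySem.Str.strip l)))) hn (by simp)
              simp only [openP, isCtxS] at h2 ⊢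
              rw [← h2]
              simp
            | some Seg.brk, _ =>
              rw [segB_step_ctx l rest (some Seg.brk) h0 hm hp (by simp), renderB_brk_cons]
              have h2 := ih rest (some (Seg.ctx (tokenize_line (PySem.Str.strip l)))) hn (by simp)
              simp only [openP, isCtxS] at h2 ⊢
              rw [← h2]
              simp
            | some (Seg.add as), _ =>
              rw [segB_step_ctx l rest (some (Seg.add as)) h0 hm hp (by simp), renderB_add_cons]
              have h2 := ih rest (some (Seg.ctx (tokenize_line (PySem.Str.strip l)))) hn (by simp)
              simp only [openP, isCtxS] at h2 ⊢
              rw [← h2]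
              simp
            | some (Seg.del ds), hcur => exact absurd rfl (hcur ds)

-- ===== VERDICT (by name: the statement is the Claim_ definition above) =====
theorem get_change_tokens_spec : Claim_equal_get_change_tokens := by
  intro s _
  unfold Spec_get_change_tokens get_change_tokens get_change_tokens_alt
  simpa [openP, isCtxS] using
    main_inv ((PySem.Str.split? (PySem.Str.strip s) "<nl>").getD []).length
      ((PySem.Str.split? (PySem.Str.strip s) "<nl>").getD []) none le_rfl (by simp)
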